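-- pv_equiv track=rewrite | github.com/fede-caballero/Automatas | Trabajo Practico 2 en clase/automata no determinista 1 y 3.py | function
-- ===== SOURCE A (Python) =====
-- def function(cadena):
--     value = True
--     estado = 1
--     for simbolo in cadena:
--         if simbolo == "a" and estado == 1:
--             estado = 1
--             value = True
--         elif simbolo == "b" and estado == 1:
--             estado = 1
--             value = True
--         else:
--             value = False
--     return value
-- ===== SOURCE B (Python) =====
-- def function(cadena):
--     return not cadena or cadena[-1] in ("a", "b")
-- ===== Notes on version B (the rewrite author's own statement) =====
-- stated objective: simpler
-- what changed: Replaces the O(n) state-machine loop with a closed-form check of only the last character (empty string gives True).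
import Mathlib
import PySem

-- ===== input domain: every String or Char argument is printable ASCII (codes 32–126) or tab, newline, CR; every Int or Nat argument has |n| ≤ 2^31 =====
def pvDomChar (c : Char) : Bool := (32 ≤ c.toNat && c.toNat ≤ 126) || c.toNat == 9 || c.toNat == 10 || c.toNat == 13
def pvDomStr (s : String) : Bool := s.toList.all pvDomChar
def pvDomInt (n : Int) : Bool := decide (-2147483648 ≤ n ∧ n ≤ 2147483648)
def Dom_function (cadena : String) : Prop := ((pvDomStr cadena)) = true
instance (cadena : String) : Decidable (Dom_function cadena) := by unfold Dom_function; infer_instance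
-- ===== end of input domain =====

-- B replaces A's whole-string state-machine loop with a closed-form check of the last character (objective: simpler).


-- ===== PORT A =====
-- one loop step of A: state is (value, estado)
def functionStep (st : Bool × Int) (simbolo : Char) : Bool × Int :=
  if simbolo = 'a' ∧ st.2 = 1 then (true, 1)
  else if simbolo = 'b' ∧ st.2 = 1 then (true, 1)
  else (false, st.2)

def function (cadena : String) : Bool :=
  (cadena.toList.foldl functionStep (true, 1)).1

-- ===== PORT B =====
-- 'not cadena or cadena[-1] in ("a","b")' ; cadena[-1] via PySem.Str.pyGet?
def function_alt (cadena : String) : Bool :=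
  cadena.toList.isEmpty ||
    (match PySem.Str.pyGet? cadena (-1) with
     | some c => c = 'a' || c = 'b'
     | none => false)

-- ===== PRECONDITION & SPEC =====
def Spec_function (cadena : String) (out : Bool) : Prop := out = function_alt cadena
instance (cadena : String) (out : Bool) : Decidable (Spec_function cadena out) := by unfold Spec_function; infer_instance

-- ===== CLAIM (what is proved, stated in full; the proofs are below) =====
def Claim_equal_function : Prop := ∀ (cadena : String), Dom_function cadena → Spec_function cadena (function cadena)

-- ===== LEMMAS AND PROOFS =====

-- A's loop invariant: estado is always 1, and the running value ends up being
-- the last-character test (or the initial value on the empty list).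
theorem functionStep_foldl (l : List Char) (v : Bool) :
    l.foldl functionStep (v, 1) =
      ((match l.getLast? with
        | some c => (c = 'a' || c = 'b')
        | none => v), 1) := by
  induction l generalizing v with
  | nil => simp
  | cons c t ih =>
    have hstep : functionStep (v, 1) c = (decide (c = 'a') || decide (c = 'b'), 1) := by
      simp only [functionStep]
      by_cases ha : c = 'a' <;> by_cases hb : c = 'b' <;> simp [ha, hb]
    rw [List.foldl_cons, hstep, ih]
    cases t with
    | nil => simp
    | cons d u =>
      obtain ⟨x, hx⟩ := Option.isSome_iff_exists.mp (by simp : (d :: u).getLast?.isSome)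
      rw [hx, List.getLast?_cons_cons, hx]

-- ===== VERDICT (by name: the statement is the Claim_ definition above) =====
theorem function_spec : Claim_equal_function := by
  intro cadena _
  unfold Spec_function function function_alt
  rw [functionStep_foldl]
  have hget : PySem.Str.pyGet? cadena (-1) = cadena.toList.getLast? := by
    simp [PySem.Str.pyGet?, PySem.List.pyGet?_neg_one]
  rw [hget]
  rcases h : cadena.toList.getLast? with _ | c
  · have : cadena.toList = [] := List.getLast?_eq_none_iff.mp h
    simp [this]
  · have hne : ¬ cadena.toList.isEmpty := by
      intro he
      rw [List.isEmpty_iff.mp he] at h; simp at h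
    simp [hne]
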